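/- GENERATED by tools/from_farm_form.py from prooffarm-gif/accepted/DGifSetupDecompress.3/Lemmas.lean (a worked proof of the farm's unit `DGifSetupDecompress.3`,
   accepted by the verdict) — do not edit. -/
import Gif.Spec.Units.DGifSetupDecompress_3
import Gif.Spec.AllSegs

/-!
  Lemmas for the unit `DGifSetupDecompress.3` (segment 3 of `DGifSetupDecompress`: the loop l.847-848
  `for (i = 0; i <= LZ_MAX_CODE; i++) Prefix[i] = NO_SUCH_CODE`, 10632DH … 10633AH).

      sd3_Scratch            the windows a round stores to: the stack below the body's stack pointer, the table `Prefix`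
      sd3_carry              `Body` (and `LZOK`, `rem`) through a footprint of such windows
      sd3_Inv                THE LOOP INVARIANT at the head 10632DH: `AtLoop` with `ebx = i ≤ 4096`
      sd3_round              ONE ROUND from the head: out to `Done` (`i = 4096`), or the head again with `i + 1`
-/

open X86 X86.User Asan ProgX.Base ProgX.Base.Spec Gif.Spec

namespace Gif.Spec.DGifSetupDecompress_3

/-- **A window a round of the loop may store to**: the stack below the body's stack pointer `[RA − 304, RA − 120)` (the return address
of the check routine), or the table `Prefix[4096]` of the private object `[pv + 8536, pv + 24920)`. -/
def sd3_Scratch (F : Forest) (e : State) (w : Span) : Prop :=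
  ((e.reg .rsp).toNat - 304 ≤ w.lo ∧ w.hi ≤ (e.reg .rsp).toNat - 120) ∨
  (F.pv + 8536 ≤ w.lo ∧ w.hi ≤ F.pv + 24920)

/-- **`Body` THROUGH THE STORES OF A ROUND.** `v` is a state with `Body`, `s` a later state: the stack pointer is the body's, `r13` is
kept, the text is unchanged, the ABI's invariant holds, no shadow byte was written, and every window written is a `sd3_Scratch`
window. Then `Body` holds of `s` (at the address `s` is at), `LZOK` is kept (no window meets the LZW scalars) and the reader is where
it was. -/
theorem sd3_carry {cut cut' : Word} {H : Heap} {rest : List Obj} {frames : List (Nat × FrameLayout)} {F : Forest} {R : Rd}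
    {u₀ e : State} {ret : Word} {v s : State}
    (hb : DGifSetupDecompress.Body cut H rest frames F R u₀ e ret v)
    (hrip : s.rip = cut') (hrsp : s.reg .rsp = e.reg .rsp - 120) (hr13 : s.reg .r13 = v.reg .r13)
    (hcode : Mem.EqOn ProgX.Base.L.textLo ProgX.Base.L.textHi u₀.mem s.mem) (habi : (conv u₀).inv s)
    {ws : List Span} (hun : ShadowUntouched v.mem s.mem) (hs : Mem.SameExcept ws v.mem s.mem)
    (hws : ∀ w, w ∈ ws → sd3_Scratch F e w) :
    DGifSetupDecompress.Body cut' H rest frames F R u₀ e ret s ∧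
    (LZOK v.mem F.pv → LZOK s.mem F.pv) ∧
    Gif.Spec.rem R s.mem = Gif.Spec.rem R v.mem := by
  have henv : Env H rest frames F R e := hb.pre.1
  have hroom : 0x700000 + 304 ≤ (e.reg .rsp).toNat := hb.entry.room
  have htop : (e.reg .rsp).toNat + 8 ≤ 0x800000 := hb.entry.top
  have hok := hb.inv.heap
  have hcur := henv.ctx.cursor_range henv.heap.inv.shadow
  have hplaced := hb.ok.owns.placed hok
  have hbase := henv.heap.base
  -- where the private object is
  have hpin := hb.ok.owns.inside hok (o := (F.pv, 24936)) (List.mem_cons_of_mem _ List.mem_cons_self)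
  simp only at hpin
  have hp1 : 0x800040 ≤ F.pv := by omega
  have hp2 : F.pv + 24968 ≤ 0xC00000 := by omega
  clear hpin
  -- every window is loose
  have hloose : ∀ w, w ∈ ws → Loose H F R w := by
    intro w hw
    rcases hws w hw with ⟨a, b⟩ | ⟨a, b⟩
    · exact Loose.stack hok (by omega) (by omega) (by omega)
    · exact Loose.pvBody (Or.inr ⟨by omega, by omega⟩)
  -- every window is a heap window
  have hwin : ∀ w, w ∈ ws → HeapWin H w := by
    intro w hw
    rcases hws w hw with ⟨a, b⟩ | ⟨a, b⟩
    · apply HeapWin.offHeap hok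
      left
      omega
    · exact HeapWin.pv hok hb.ok.owns (by omega) (by omega)
  -- every window misses the cursor
  have hoffcur : ∀ w, w ∈ ws → w.hi ≤ R.cur ∨ R.cur + 16 ≤ w.lo := by
    intro w hw
    exact (hloose w hw).off_cursor hok hplaced ⟨hcur.1, hcur.2.1⟩
  -- every window misses the saved registers' slots and the return-address slot
  have hslots : ∀ a k : Nat, ((e.reg .rsp).toNat - 120 ≤ a ∧ a + k ≤ (e.reg .rsp).toNat + 8) →
      ∀ w, w ∈ ws → a + k ≤ w.lo ∨ w.hi ≤ a := by
    intro a k hak w hw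
    rcases hws w hw with ⟨p, q⟩ | ⟨p, q⟩
    · omega
    · omega
  -- the footprint since the entry: every window lies inside one of the contract's
  have hsameE : Mem.SameExcept
      [⟨(e.reg .rsp).toNat - 304, (e.reg .rsp).toNat⟩,
       shadowSpan ((e.reg .rsp).toNat - 120) ((e.reg .rsp).toNat - 56),
       ⟨F.pv + 8, F.pv + 56⟩,
       ⟨F.pv + 88, F.pv + 89⟩,
       ⟨F.pv + 8536, F.pv + 24920⟩,
       ⟨F.gif + 96, F.gif + 100⟩,
       ⟨R.cur, R.cur + 8⟩] e.mem s.mem := by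
    apply Mem.SameExcept.step_same' hb.same hs
    intro w hw
    by_cases hempty : w.hi ≤ w.lo
    · left
      exact hempty
    right
    rcases hws w hw with ⟨a, b⟩ | ⟨a, b⟩
    · exact ⟨⟨(e.reg .rsp).toNat - 304, (e.reg .rsp).toNat⟩, by simp only [List.mem_cons, true_or], by simp only; omega,
        by simp only; omega⟩
    · exact ⟨⟨F.pv + 8536, F.pv + 24920⟩, by simp only [List.mem_cons, true_or, or_true], by simp only; omega,
        by simp only; omega⟩
  have e_rem : Gif.Spec.rem R s.mem = Gif.Spec.rem R v.mem := rem_sameExcept hs (by omega) hoffcur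
  refine ⟨⟨hb.entry, hb.pre, hrip, hrsp, ?_, ?_, ?_, ?_, ?_, ?_, ?_, ?_, ?_, ?_, ?_, hsameE,
    ProgX.Base.conv_code_in hcode, habi⟩, ?_, e_rem⟩
  · rw [hr13]
    exact hb.r13
  · exact slot_sameExcept hs (e.reg .rsp) 8 8 _ (by omega) (by omega) hb.slot_r15 (hslots _ _ (by omega))
  · exact slot_sameExcept hs (e.reg .rsp) 16 8 _ (by omega) (by omega) hb.slot_r14 (hslots _ _ (by omega))
  · exact slot_sameExcept hs (e.reg .rsp) 24 8 _ (by omega) (by omega) hb.slot_r13 (hslots _ _ (by omega))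
  · exact slot_sameExcept hs (e.reg .rsp) 32 8 _ (by omega) (by omega) hb.slot_r12 (hslots _ _ (by omega))
  · exact slot_sameExcept hs (e.reg .rsp) 40 8 _ (by omega) (by omega) hb.slot_rbp (hslots _ _ (by omega))
  · exact slot_sameExcept hs (e.reg .rsp) 48 8 _ (by omega) (by omega) hb.slot_rbx (hslots _ _ (by omega))
  · rw [hs.readLE (e.reg .rsp) 8 (by omega) (hslots _ _ (by omega))]
    exact hb.slot_ra
  · exact hb.inv.sameExcept hun hs hwin
  · exact hb.ok.sameExcept hok ⟨hcur.1, hcur.2.1⟩ hs hloose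
  · rw [e_rem]
    exact hb.rem
  · intro hlz
    apply hlz.sameExcept hs (by omega)
    intro w hw
    rcases hws w hw with ⟨a, b⟩ | ⟨a, b⟩
    · omega
    · omega

/-- **THE LOOP INVARIANT at the head 10632DH** (`cmp ebx, 0xfff`, l.847), for the counter `i`: `AtLoop` with `ebx = i ≤ 4096` in place
of `ebx = 0`. The rounds store to `Prefix` and to the stack below the body only: `Body`, `LZOK` and the reader's position stay. -/
structure sd3_Inv (i : Nat) (H : Heap) (rest : List Obj) (frames : List (Nat × FrameLayout)) (F : Forest) (R : Rd) (u₀ e : State)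
    (ret : Word) (v : State) : Prop where
  /-- what holds at every cut of the body -/
  body : DGifSetupDecompress.Body Gif.L.DGifSetupDecompress.at_10632d H rest frames F R u₀ e ret v
  /-- `r12 = Private->Prefix` -/
  r12 : (v.reg .r12).toNat = F.pv + 8536
  /-- `rbx = i`, the whole register -/
  rbx : v.reg .rbx = UInt64.ofNat i
  /-- `i ≤ 4096` -/
  le : i ≤ 4096
  /-- the LZW field ranges -/
  lz : LZOK v.mem F.pv
  /-- exactly one byte was consumed -/
  rem1 : Gif.Spec.rem R v.mem + 1 = Gif.Spec.rem R e.mem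

set_option maxRecDepth 4000 in
set_option maxHeartbeats 4000000 in
/-- **ONE ROUND OF THE LOOP** from the head 10632DH (l.847 `i <= LZ_MAX_CODE`): `i = 4096`: `eax = 1` and out to the cut 10633AH
(`Done`); `i < 4096`: the checked store `Prefix[i] = NO_SUCH_CODE` (106314H … 10632AH, l.848: inside `Prefix[4096]`, `prefixLive`),
`i + 1`, and the head again. -/
theorem sd3_round (Lay : Layout) (hLay : Lay.hi = 0x1000000) (μ : Microarch) (hμ : UserX.MicroOK μ) (u₀ : State)
    (hcode : HasCodeNat Lay u₀ Gif.L.DGifSetupDecompress.entry Gif.Code.code_DGifSetupDecompress.nat Gif.L.DGifSetupDecompress.size)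
    (h_store4 : Asan.SmallCheck Lay μ ProgX.Base.WayInv (ProgX.Base.CodeOK u₀) [.rax, .rcx, .rdx] 4
      ProgX.Base.L.__asan_store4_noabort.entry)
    (H : Heap) (rest : List Obj) (frames : List (Nat × FrameLayout)) (F : Forest) (R : Rd) (e : State) (ret : Word) (i : Nat)
    (v : State) (hat : sd3_Inv i H rest frames F R u₀ e ret v) :
    ReachVia Lay μ WayInv v (fun w => DGifSetupDecompress.Done H rest frames F R u₀ e ret w ∨
      (sd3_Inv (i + 1) H rest frames F R u₀ e ret w ∧ i < 4096)) := by
  obtain ⟨hbody, h_r12, h_rbx, h_le, h_lz, h_rem1⟩ := hat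
  -- 1. THE PRELUDE
  have he := hbody.entry
  v_entry he
  have henv : Env H rest frames F R e := hbody.pre.1
  have hbase := henv.heap.base
  have hpin := hbody.ok.owns.inside hbody.inv.heap (o := (F.pv, 24936)) (List.mem_cons_of_mem _ List.mem_cons_self)
  simp only at hpin
  have hp1 : 0x800040 ≤ F.pv := by omega
  have hp2 : F.pv + 24968 ≤ 0xC00000 := by omega
  clear hpin
  -- the present state, in the walker's names
  have w_rip := hbody.rip
  have c_rsp : v.reg .rsp = e.reg .rsp - 120 := hbody.rsp
  have w_eq : Mem.EqOn ProgX.Base.L.textLo ProgX.Base.L.textHi u₀.mem v.mem := ProgX.Base.conv_code_eqOn hbody.code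
  have hdf : v.flags .df = false := (show abiInv _ from hbody.abi).1
  have hmx : v.mxcsr &&& 0x1F80 = 0x1F80 := (show abiInv _ from hbody.abi).2
  have hsse := ProgX.Base.sseOK_of_abiInv hbody.abi
  have w_kept : RegsKept [.rsp] v v := RegsKept.refl _ _
  -- the registers the round reads
  have c_rbx : v.reg .rbx = UInt64.ofNat i := h_rbx
  obtain ⟨p, c_r12⟩ : ∃ p : Word, v.reg .r12 = p := ⟨_, rfl⟩
  rw [c_r12] at h_r12
  have hi31 : i < 2 ^ 31 := by omega
  -- 2. THE WALK: out to the cut, or once around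
  u_walk hcode [hμ.vendor, Gif.Spec.cnt32_sext i hi31]
    until [Gif.L.DGifSetupDecompress.at_10632d, Gif.L.DGifSetupDecompress.at_10633a]
    span [ProgX.Base.L.textLo, ProgX.Base.L.textHi] side (v_side)
  case check_10631e =>
    -- 0x10631e, l.848 `Prefix[i] =`: `jle` taken: `i ≤ 4095`: inside `Prefix[4096]`
    have e4095 : (4095#32).toInt = 4095 := by decide
    rw [Gif.Spec.cnt32_part_toInt i hi31, e4095] at hbr_106333
    have hi : i < 4096 := by omega
    have hun : ShadowUntouched v.mem s_10631e.mem := by v_untouched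
    have hl := prefixLive hbody.ok.pv_live rest (DGifSetupDecompress.framesIn frames e) i hi
    simp only [gfield] at hl
    exact hl.accSmall hbody.inv.shadow hun _ 4 (by decide) (by u_omega) (by u_omega)
  · -- 0x10632a → 0x10632d (l.847): THE BACK EDGE, `i + 1`
    have e4095 : (4095#32).toInt = 4095 := by decide
    rw [Gif.Spec.cnt32_part_toInt i hi31, e4095] at hbr_106333
    have hi : i < 4096 := by omega
    -- what was stored: the return address of the check, `Prefix[i]`
    have hun : ShadowUntouched v.mem s_10632a.mem := by v_untouched
    have hsame : Mem.SameExcept [⟨(e.reg .rsp).toNat - 128, (e.reg .rsp).toNat - 120⟩, ⟨F.pv + 8536, F.pv + 24920⟩]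
        v.mem s_10632a.mem := by
      rw [w_mem]
      u_same
    have habi : (conv u₀).inv s_10632a := by
      refine ProgX.Base.abiInv_of ?_ ?_
      · rw [w_flags, X86.User.df_setStatus]
        exact w_df_10631e
      · rw [w_mxcsr]
        exact hmx
    obtain ⟨k_body, k_lz, k_rem⟩ :=
      sd3_carry (cut' := Gif.L.DGifSetupDecompress.at_10632d) hbody w_rip w_rsp (w_kept .r13 rfl) w_eq habi hun hsame (by
        simp only [List.forall_mem_cons, List.not_mem_nil, false_imp_iff, implies_true, and_true, sd3_Scratch]
        omega)
    refine ReachVia.done (Or.inr ⟨⟨k_body, ?_, ?_, by omega, k_lz h_lz, ?_⟩, hi⟩)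
    · rw [w_kept .r12 rfl, c_r12]
      exact h_r12
    · rw [w_rbx]
      exact Gif.Spec.cnt32_succ i (by omega)
    · rw [k_rem]
      exact h_rem1
  · -- 0x106335 → 0x10633a (l.851): THE EXIT, `eax = 1`; nothing was stored
    have hun : ShadowUntouched v.mem s_106335.mem := by v_untouched
    have hsame : Mem.SameExcept [] v.mem s_106335.mem := by
      rw [w_mem]
      u_same
    have habi : (conv u₀).inv s_106335 := by
      refine ProgX.Base.abiInv_of ?_ ?_
      · rw [w_flags, X86.User.df_setStatus]
        exact hdf
      · rw [w_mxcsr]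
        exact hmx
    obtain ⟨k_body, k_lz, k_rem⟩ :=
      sd3_carry (cut' := Gif.L.DGifSetupDecompress.at_10633a) hbody w_rip w_rsp (w_kept .r13 rfl) w_eq habi hun hsame (by
        intro w hw
        exact absurd hw List.not_mem_nil)
    refine ReachVia.done (Or.inl ⟨k_body, ?_, ?_⟩)
    · left
      rw [w_rax]
      decide
    · intro _
      refine ⟨k_lz h_lz, ?_⟩
      rw [k_rem]
      exact h_rem1

end Gif.Spec.DGifSetupDecompress_3
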